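-- pv_equiv track=rewrite | github.com/Tewi/PrefixFreeCodes | Experiments/alternationMeasure.py | EISignatureAndAlternation
-- ===== SOURCE A (Python) =====
-- def EISignatureAndAlternation(W):
--     """Given a list of weights, return the EI signature and the Alternation of the instance recording the result of each comparison performed by Huffman's algorithm or van Leeuwen's algorithm.
--
--     >>> EISignatureAndAlternation([1,1,4])
--     ('EEIEI', 2)
--    """
--
--     if W==[]:
--         return ("",0)
--     elif len(W)==1:
--         return ("E",1)
--     W = sorted(W)
--     i = 0
--     trees = []
--     signature = ""
--     previous = 'E'
--     alternation = 0
--     while i<len(W) or len(trees)>1: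
--         if len(trees) == 0 or (i<len(W) and W[i] <= trees[0][0]):
--             left = [W[i]]
--             i += 1
--             signature = signature + "E"
--             previous = 'E'
--         else:
--             left = trees[0]
--             trees = trees[1:]
--             signature = signature + "I"
--             if previous == 'E':
--                 alternation += 1
--             previous = 'I'
--         if len(trees) == 0 or (i<len(W) and W[i] <= trees[0][0]):
--             right = [W[i]]
--             i += 1
--             signature = signature + "E"
--             previous = 'E'
--         else:
--             right = trees[0]
--             trees = trees[1:]
--             signature = signature + "I"
--             if previous == 'E':
--                 alternation += 1
--             previous = 'I'
--         parent = [left[0] + right[0], left,right]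
--         trees.append(parent)
--     signature = signature + "I"
--     if previous == 'E':
--         alternation += 1
--     return (signature,alternation)
-- ===== SOURCE B (Python) =====
-- def EISignatureAndAlternation(W):
--     """Re-implementation with Huffman's original single sorted worklist instead of
--     van Leeuwen's two queues: no leaf-vs-tree comparison at selection time -- the two
--     front items of the worklist are always taken (their 'E'/'I' labels are carried in
--     the worklist itself), and the merged node is re-inserted at its sorted position
--     (after all items of weight <= w), found by binary search.  The alternation is
--     counted in a post-pass over the finished signature."""
--     if not W:
--         return ("", 0)
--     if len(W) == 1:
--         return ("E", 1)
--     agenda = [(w, 'E') for w in sorted(W)]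
--     sig = []
--     while len(agenda) > 1:
--         (x, cx) = agenda[0]
--         (y, cy) = agenda[1]
--         sig.append(cx)
--         sig.append(cy)
--         del agenda[:2]
--         w = x + y
--         lo, hi = 0, len(agenda)
--         while lo < hi:
--             mid = (lo + hi) // 2
--             if agenda[mid][0] <= w:
--                 lo = mid + 1
--             else:
--                 hi = mid
--         agenda.insert(lo, (w, 'I'))
--     signature = ''.join(sig) + 'I'
--     alternation = sum(1 for a, b in zip(signature, signature[1:])
--                       if a == 'E' and b == 'I')
--     return (signature, alternation)
-- ===== Notes on version B (the rewrite author's own statement) =====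
-- stated objective: alternative
-- what changed: B replaces van Leeuwen's two-queue scheme (compare next leaf against front tree at every selection, append merged trees to a FIFO of nested lists) by Huffman's original single sorted worklist: the two front items are always taken unconditionally, their E/I labels live in the worklist, the merged weight is re-inserted at its sorted position found by binary search, and the alternation is counted in a post-pass instead of the in-loop previous/alternation state machine.
import Mathlib
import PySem

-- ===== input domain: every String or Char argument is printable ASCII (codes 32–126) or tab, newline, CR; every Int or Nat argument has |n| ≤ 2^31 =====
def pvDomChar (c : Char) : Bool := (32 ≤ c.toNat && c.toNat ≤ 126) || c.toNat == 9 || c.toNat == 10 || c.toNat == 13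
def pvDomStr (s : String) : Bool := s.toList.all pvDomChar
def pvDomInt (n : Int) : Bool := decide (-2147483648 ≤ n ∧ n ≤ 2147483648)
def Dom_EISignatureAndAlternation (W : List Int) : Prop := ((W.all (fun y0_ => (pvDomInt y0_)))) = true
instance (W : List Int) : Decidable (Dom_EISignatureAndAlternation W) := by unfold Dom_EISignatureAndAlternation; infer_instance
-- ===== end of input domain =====

-- B replaces A's two-queue selection (leaf-vs-tree comparison, FIFO of merged trees,
-- in-loop previous/alternation state machine) by Huffman's single sorted worklist with
-- E/I labels and sorted re-insertion, counting the alternation in a post-pass (objective: alternative).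

-- ===== PORT A =====
-- A's nested Python lists [w, left, right] / [w] are represented by an explicit tree
-- type carrying the same weight in the head position (only trees[0][0] is ever read).
inductive PTree where
  | leaf : Int → PTree
  | node : Int → PTree → PTree → PTree
deriving DecidableEq, Repr

def PTree.wt : PTree → Int
  | .leaf w => w
  | .node w _ _ => w

-- A's while loop, transliterated (fuel makes the recursion total; it is never exhausted
-- on the top-level call, where fuel = len(W) bounds the number of iterations).
def loopA (fuel : Nat) (W : List Int) (i : Nat) (trees : List PTree)
    (sig : List Char) (prev : Char) (alt : Int) : List Char × Int :=
  match fuel with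
  | 0 => (sig ++ ['I'], alt + if prev = 'E' then 1 else 0)
  | fuel + 1 =>
    if i < W.length ∨ trees.length > 1 then
      let s₁ : PTree × Nat × List PTree × List Char × Char × Int :=
        if trees.length = 0 ∨ (i < W.length ∧ W.getD i 0 ≤ (trees.headD (.leaf 0)).wt) then
          (.leaf (W.getD i 0), i + 1, trees, sig ++ ['E'], 'E', alt)
        else
          (trees.headD (.leaf 0), i, trees.tail, sig ++ ['I'], 'I',
            alt + if prev = 'E' then 1 else 0)
      match s₁ with
      | (left, i₁, trees₁, sig₁, prev₁, alt₁) =>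
        let s₂ : PTree × Nat × List PTree × List Char × Char × Int :=
          if trees₁.length = 0 ∨ (i₁ < W.length ∧ W.getD i₁ 0 ≤ (trees₁.headD (.leaf 0)).wt) then
            (.leaf (W.getD i₁ 0), i₁ + 1, trees₁, sig₁ ++ ['E'], 'E', alt₁)
          else
            (trees₁.headD (.leaf 0), i₁, trees₁.tail, sig₁ ++ ['I'], 'I',
              alt₁ + if prev₁ = 'E' then 1 else 0)
        match s₂ with
        | (right, i₂, trees₂, sig₂, prev₂, alt₂) =>
          loopA fuel W i₂ (trees₂ ++ [.node (left.wt + right.wt) left right]) sig₂ prev₂ alt₂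
    else (sig ++ ['I'], alt + if prev = 'E' then 1 else 0)

def EISignatureAndAlternation (W : List Int) : String × Int :=
  if W = [] then ("", 0)
  else if W.length = 1 then ("E", 1)
  else
    let Ws := PySem.List.sorted W (fun x => x) false
    let r := loopA W.length Ws 0 [] [] 'E' 0
    (String.ofList r.1, r.2)

-- ===== PORT B =====
-- Source B's inner while loop: binary search for the insertion point (indices stay in
-- range, so getD is exact for agenda[mid]; Python's // on the nonnegative lo+hi is Nat division).
-- (fuel = hi - lo at the call site bounds the iterations, making the recursion structural)
def bsearch (rest : List (Int × Char)) (w : Int) (fuel lo hi : Nat) : Nat :=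
  match fuel with
  | 0 => lo
  | fuel + 1 =>
    if lo < hi then
      let mid := (lo + hi) / 2
      if (rest.getD mid (0, 'E')).1 ≤ w then bsearch rest w fuel (mid + 1) hi
      else bsearch rest w fuel lo mid
    else lo

-- Source B's main while loop (fuel = len(W) bounds the number of iterations): take the two
-- front items (del agenda[:2] = drop 2), record their labels, re-insert the merged
-- weight at the position the binary search found (list.insert = PySem.List.insert).
def loopB (fuel : Nat) (agenda : List (Int × Char)) (sig : List Char) : List Char :=
  match fuel with
  | 0 => sig
  | fuel + 1 =>
    if agenda.length > 1 then
      let x := agenda.getD 0 (0, 'E')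
      let y := agenda.getD 1 (0, 'E')
      let rest := agenda.drop 2
      let w := x.1 + y.1
      let lo := bsearch rest w rest.length 0 rest.length
      loopB fuel (PySem.List.insert rest (lo : Int) (w, 'I')) (sig ++ [x.2, y.2])
    else sig

-- Source B's sum over zip(signature, signature[1:]): count of adjacent 'E','I' pairs.
def pairCount : List Char → Int
  | a :: b :: rest => (if a = 'E' ∧ b = 'I' then 1 else 0) + pairCount (b :: rest)
  | _ => 0

def EISignatureAndAlternation_alt (W : List Int) : String × Int :=
  if W = [] then ("", 0)
  else if W.length = 1 then ("E", 1)
  else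
    let agenda := (PySem.List.sorted W (fun x => x) false).map (fun w => (w, 'E'))
    let sig := loopB W.length agenda [] ++ ['I']
    (String.ofList sig, pairCount sig)

-- ===== PRECONDITION & SPEC =====
def Spec_EISignatureAndAlternation (W : List Int) (out : String × Int) : Prop := out = EISignatureAndAlternation_alt W
instance (W : List Int) (out : String × Int) : Decidable (Spec_EISignatureAndAlternation W out) := by unfold Spec_EISignatureAndAlternation; infer_instance

-- ===== CLAIM (what is proved, stated in full; the proofs are below) =====
def Claim_equal_EISignatureAndAlternation : Prop := ∀ (W : List Int), Dom_EISignatureAndAlternation W → Spec_EISignatureAndAlternation W (EISignatureAndAlternation W)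

-- ===== LEMMAS AND PROOFS =====

-- A's two-queue selection rule, signature only (proof-side abstraction of loopA's picks).
def pickA (L : List Int) (i : Nat) (Q : List Int) : Int × Nat × List Int × Char :=
  if Q = [] ∨ (i < L.length ∧ L.getD i 0 ≤ Q.headD 0) then
    (L.getD i 0, i + 1, Q, 'E')
  else (Q.headD 0, i, Q.tail, 'I')

-- A's loop with the trees abstracted to their weights and alternation dropped.
def sigAcc (fuel : Nat) (L : List Int) (i : Nat) (Q : List Int) (sig : List Char) : List Char :=
  match fuel with
  | 0 => sig ++ ['I']
  | fuel + 1 =>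
    if i < L.length ∨ Q.length > 1 then
      match pickA L i Q with
      | (x, i₁, Q₁, c₁) =>
        match pickA L i₁ Q₁ with
        | (y, i₂, Q₂, c₂) => sigAcc fuel L i₂ (Q₂ ++ [x + y]) (sig ++ [c₁, c₂])
    else sig ++ ['I']

-- A's running transition count: number of E→I steps read from `prev` through the list.
def countTrans : Char → List Char → Int
  | _, [] => 0
  | p, c :: cs => (if p = 'E' ∧ c = 'I' then 1 else 0) + countTrans c cs

-- The sorted E/I worklist corresponding to two-queue state (remaining leaves, tree weights).
def mergeEI : List Int → List Int → List (Int × Char)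
  | [], Q => Q.map (fun q => (q, 'I'))
  | a :: L, [] => (a, 'E') :: mergeEI L []
  | a :: L, b :: Q => if a ≤ b then (a, 'E') :: mergeEI L (b :: Q) else (b, 'I') :: mergeEI (a :: L) Q
termination_by L Q => L.length + Q.length

-- Proof-side: the number of leading worklist entries of weight ≤ w (the insertion
-- point the binary search computes on a sorted worklist).
def insPos : List (Int × Char) → Int → Nat
  | [], _ => 0
  | p :: rest, w => if p.1 ≤ w then insPos rest w + 1 else 0

-- Sorted insertion of (w,'I') after all entries of weight ≤ w.
def insW : List (Int × Char) → Int → List (Int × Char)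
  | [], w => [(w, 'I')]
  | p :: xs, w => if p.1 ≤ w then p :: insW xs w else (w, 'I') :: p :: xs

theorem pairCount_eq_countTrans (c : Char) (l : List Char) :
    pairCount (c :: l) = countTrans c l := by
  induction l generalizing c with
  | nil => simp [pairCount, countTrans]
  | cons b rest ih => simp [pairCount, countTrans, ih]

theorem sigAcc_append (fuel : Nat) (L : List Int) (i : Nat) (Q : List Int)
    (sig : List Char) :
    sigAcc fuel L i Q sig = sig ++ sigAcc fuel L i Q [] := by
  induction fuel generalizing i Q sig with
  | zero => simp [sigAcc]
  | succ fuel ih =>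
    simp only [sigAcc]
    split
    · rcases h₁ : pickA L i Q with ⟨x, i₁, Q₁, c₁⟩
      rcases h₂ : pickA L i₁ Q₁ with ⟨y, i₂, Q₂, c₂⟩
      conv_lhs => rw [ih]
      conv_rhs => rw [ih]
      simp
    · simp

theorem loopB_append (fuel : Nat) (agenda : List (Int × Char)) (sig : List Char) :
    loopB fuel agenda sig = sig ++ loopB fuel agenda [] := by
  induction fuel generalizing agenda sig with
  | zero => simp [loopB]
  | succ fuel ih =>
    simp only [loopB]
    split
    · conv_lhs => rw [ih]
      conv_rhs => rw [ih]
      simp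
    · simp

theorem headD_map_wt (trees : List PTree) :
    (trees.map PTree.wt).headD 0 = (trees.headD (.leaf 0)).wt := by
  cases trees <;> simp [PTree.wt]

theorem tail_map_wt (trees : List PTree) :
    (trees.map PTree.wt).tail = trees.tail.map PTree.wt := by
  cases trees <;> simp

theorem cond_iff_map (trees : List PTree) (W : List Int) (i : Nat) :
    (trees.length = 0 ∨ (i < W.length ∧ W.getD i 0 ≤ (trees.headD (.leaf 0)).wt)) ↔
    (trees.map PTree.wt = [] ∨ (i < W.length ∧ W.getD i 0 ≤ (trees.map PTree.wt).headD 0)) := by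
  rw [headD_map_wt]
  simp [List.length_eq_zero_iff]

-- Step 1: loopA computes sigAcc's signature plus the E→I transition count.
theorem loopA_eq_sigAcc (fuel : Nat) (W : List Int) :
    ∀ (i : Nat) (trees : List PTree) (sig : List Char) (prev : Char) (alt : Int),
    loopA fuel W i trees sig prev alt =
      (sig ++ sigAcc fuel W i (trees.map PTree.wt) [],
       alt + countTrans prev (sigAcc fuel W i (trees.map PTree.wt) [])) := by
  induction fuel with
  | zero => intro i trees sig prev alt; simp [loopA, sigAcc, countTrans]
  | succ fuel ih =>
    intro i trees sig prev alt
    have hlen : (trees.map PTree.wt).length = trees.length := by simp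
    by_cases hc : i < W.length ∨ trees.length > 1
    · have hc' : i < W.length ∨ (trees.map PTree.wt).length > 1 := by rw [hlen]; exact hc
      rw [loopA, if_pos hc]
      conv_rhs => rw [sigAcc, if_pos hc']
      by_cases h₁ : trees.length = 0 ∨ (i < W.length ∧ W.getD i 0 ≤ (trees.headD (.leaf 0)).wt)
      · rw [if_pos h₁]
        conv_rhs => rw [pickA, if_pos ((cond_iff_map trees W i).mp h₁)]
        dsimp only
        by_cases h₂ : trees.length = 0 ∨ (i + 1 < W.length ∧ W.getD (i+1) 0 ≤ (trees.headD (.leaf 0)).wt)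
        · rw [if_pos h₂]
          conv_rhs => rw [pickA, if_pos ((cond_iff_map trees W (i+1)).mp h₂)]
          dsimp only
          rw [ih, sigAcc_append fuel W _ _ ([] ++ ['E', 'E'])]
          simp [PTree.wt, countTrans]
        · rw [if_neg h₂]
          conv_rhs => rw [pickA, if_neg (fun h => h₂ ((cond_iff_map trees W (i+1)).mpr h))]
          dsimp only
          rw [headD_map_wt, tail_map_wt]
          rw [ih, sigAcc_append fuel W _ _ ([] ++ ['E', 'I'])]
          simp [PTree.wt, countTrans]
          ring
      · rw [if_neg h₁]
        conv_rhs => rw [pickA, if_neg (fun h => h₁ ((cond_iff_map trees W i).mpr h))]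
        dsimp only
        rw [tail_map_wt, headD_map_wt]
        by_cases h₂ : trees.tail.length = 0 ∨ (i < W.length ∧ W.getD i 0 ≤ (trees.tail.headD (.leaf 0)).wt)
        · rw [if_pos h₂]
          conv_rhs => rw [pickA, if_pos ((cond_iff_map trees.tail W i).mp h₂)]
          dsimp only
          rw [ih, sigAcc_append fuel W _ _ ([] ++ ['I', 'E'])]
          simp [PTree.wt, countTrans]
          split_ifs <;> ring
        · rw [if_neg h₂]
          conv_rhs => rw [pickA, if_neg (fun h => h₂ ((cond_iff_map trees.tail W i).mpr h))]
          dsimp only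
          rw [headD_map_wt trees.tail, tail_map_wt trees.tail]
          rw [ih, sigAcc_append fuel W _ _ ([] ++ ['I', 'I'])]
          simp [PTree.wt, countTrans]
          split_ifs <;> ring
    · have hc' : ¬ (i < W.length ∨ (trees.map PTree.wt).length > 1) := by rw [hlen]; exact hc
      rw [loopA, if_neg hc]
      conv_rhs => rw [sigAcc, if_neg hc']
      simp [countTrans]

theorem mergeEI_nil_right (L : List Int) : mergeEI L [] = L.map (fun a => (a, 'E')) := by
  induction L with
  | nil => simp [mergeEI]
  | cons a L ih => simp [mergeEI, ih]

theorem mergeEI_length (L Q : List Int) : (mergeEI L Q).length = L.length + Q.length := by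
  induction L, Q using mergeEI.induct with
  | case1 Q => simp [mergeEI]
  | case2 a L ih => simp [mergeEI, ih]
  | case3 a L b Q h ih => simp [mergeEI, h, ih]; omega
  | case4 a L b Q h ih => simp [mergeEI, h, ih]; omega

theorem mem_mergeEI_int (L Q : List Int) (q : Int) (hq : q ∈ Q) :
    (q, 'I') ∈ mergeEI L Q := by
  induction L, Q using mergeEI.induct with
  | case1 Q => simp only [mergeEI]; exact List.mem_map.mpr ⟨q, hq, rfl⟩
  | case2 a L ih => simp at hq
  | case3 a L b Q h ih =>
    simp only [mergeEI, if_pos h]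
    exact List.mem_cons_of_mem _ (ih hq)
  | case4 a L b Q h ih =>
    simp only [mergeEI, if_neg h]
    rcases List.mem_cons.mp hq with h1 | h1
    · subst h1; exact List.mem_cons_self
    · exact List.mem_cons_of_mem _ (ih h1)

theorem wt_mem_mergeEI (L Q : List Int) (p : Int × Char) (hp : p ∈ mergeEI L Q) :
    p.1 ∈ L ∨ p.1 ∈ Q := by
  induction L, Q using mergeEI.induct with
  | case1 Q => simp [mergeEI] at hp; rcases hp with ⟨q, hq, rfl⟩; exact Or.inr hq
  | case2 a L ih =>
    simp only [mergeEI] at hp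
    rcases List.mem_cons.mp hp with rfl | h1
    · simp
    · rcases ih h1 with h | h
      · exact Or.inl (List.mem_cons_of_mem _ h)
      · exact Or.inr h
  | case3 a L b Q h ih =>
    simp only [mergeEI, if_pos h] at hp
    rcases List.mem_cons.mp hp with rfl | h1
    · simp
    · rcases ih h1 with h2 | h2
      · exact Or.inl (List.mem_cons_of_mem _ h2)
      · exact Or.inr h2
  | case4 a L b Q h ih =>
    simp only [mergeEI, if_neg h] at hp
    rcases List.mem_cons.mp hp with rfl | h1
    · simp
    · rcases ih h1 with h2 | h2
      · exact Or.inl h2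
      · exact Or.inr (List.mem_cons_of_mem _ h2)

theorem mergeEI_sorted (L Q : List Int) (hL : L.Pairwise (· ≤ ·)) (hQ : Q.Pairwise (· ≤ ·)) :
    (mergeEI L Q).Pairwise (fun p r => p.1 ≤ r.1) := by
  induction L, Q using mergeEI.induct with
  | case1 Q => simp only [mergeEI]; exact List.pairwise_map.mpr hQ
  | case2 a L ih =>
    simp only [mergeEI]
    refine List.pairwise_cons.mpr ⟨?_, ih (List.pairwise_cons.mp hL).2 hQ⟩
    intro p hp
    rcases wt_mem_mergeEI L [] p hp with h | h
    · exact (List.pairwise_cons.mp hL).1 _ h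
    · simp at h
  | case3 a L b Q h ih =>
    simp only [mergeEI, if_pos h]
    refine List.pairwise_cons.mpr ⟨?_, ih (List.pairwise_cons.mp hL).2 hQ⟩
    intro p hp
    rcases wt_mem_mergeEI L (b :: Q) p hp with h1 | h1
    · exact (List.pairwise_cons.mp hL).1 _ h1
    · rcases List.mem_cons.mp h1 with rfl | h2
      · exact h
      · exact le_trans h ((List.pairwise_cons.mp hQ).1 _ h2)
  | case4 a L b Q h ih =>
    simp only [mergeEI, if_neg h]
    refine List.pairwise_cons.mpr ⟨?_, ih hL (List.pairwise_cons.mp hQ).2⟩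
    intro p hp
    rcases wt_mem_mergeEI (a :: L) Q p hp with h1 | h1
    · rcases List.mem_cons.mp h1 with rfl | h2
      · exact le_of_not_ge h
      · exact le_trans (le_of_not_ge h) ((List.pairwise_cons.mp hL).1 _ h2)
    · exact (List.pairwise_cons.mp hQ).1 _ h1

theorem labels_mergeEI_nil (L : List Int) (p : Int × Char) (hp : p ∈ mergeEI L []) :
    p.2 = 'E' := by
  rw [mergeEI_nil_right] at hp
  simp at hp
  rcases hp with ⟨a, _, rfl⟩
  rfl

theorem insW_perm (xs : List (Int × Char)) (w : Int) :
    (insW xs w).Perm ((w, 'I') :: xs) := by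
  induction xs with
  | nil => simp [insW]
  | cons p xs ih =>
    simp only [insW]
    split
    · exact ((ih.cons p).trans (List.Perm.swap _ _ _))
    · exact List.Perm.refl _

theorem mem_insW (xs : List (Int × Char)) (w : Int) (p : Int × Char)
    (hp : p ∈ insW xs w) : p = (w, 'I') ∨ p ∈ xs := by
  have := (insW_perm xs w).mem_iff.mp hp
  simpa using this

theorem insW_eq_insPos (xs : List (Int × Char)) (w : Int) :
    insW xs w = xs.take (insPos xs w) ++ [(w, 'I')] ++ xs.drop (insPos xs w) := by
  induction xs with
  | nil => simp [insW, insPos]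
  | cons p xs ih =>
    simp only [insW, insPos]
    split
    · simp [ih]
    · simp

theorem insPos_le_length (xs : List (Int × Char)) (w : Int) : insPos xs w ≤ xs.length := by
  induction xs with
  | nil => simp [insPos]
  | cons p xs ih => simp only [insPos]; split <;> simp only [List.length_cons] <;> omega

theorem insPos_le_mem (xs : List (Int × Char)) (w : Int) (j : Nat)
    (hj : j < insPos xs w) : (xs.getD j (0, 'E')).1 ≤ w := by
  induction xs generalizing j with
  | nil => simp [insPos] at hj
  | cons p xs ih =>
    simp only [insPos] at hj
    by_cases hp : p.1 ≤ w
    · rw [if_pos hp] at hj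
      cases j with
      | zero => simpa using hp
      | succ j => simpa using ih j (by omega)
    · rw [if_neg hp] at hj; omega

theorem insPos_lt_gt (xs : List (Int × Char)) (w : Int)
    (h : insPos xs w < xs.length) : ¬ (xs.getD (insPos xs w) (0, 'E')).1 ≤ w := by
  induction xs with
  | nil => simp at h
  | cons p xs ih =>
    by_cases hp : p.1 ≤ w
    · simp only [insPos, if_pos hp] at h ⊢
      simpa using ih (by simpa using h)
    · simp only [insPos, if_neg hp]
      simpa using hp

theorem sorted_insPos_gt (xs : List (Int × Char)) (w : Int)
    (hs : xs.Pairwise (fun p r => p.1 ≤ r.1)) (j : Nat)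
    (h1 : insPos xs w ≤ j) (h2 : j < xs.length) :
    ¬ (xs.getD j (0, 'E')).1 ≤ w := by
  have hlt : insPos xs w < xs.length := by omega
  have hgt := insPos_lt_gt xs w hlt
  rcases Nat.eq_or_lt_of_le h1 with rfl | hlt2
  · exact hgt
  · intro hle
    apply hgt
    have := (List.pairwise_iff_getElem.mp hs) (insPos xs w) j hlt h2 hlt2
    rw [List.getD_eq_getElem _ _ hlt, List.getD_eq_getElem _ _ h2] at *
    exact le_trans this hle

theorem bsearch_eq (xs : List (Int × Char)) (w : Int)
    (hs : xs.Pairwise (fun p r => p.1 ≤ r.1)) :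
    ∀ (d lo hi : Nat), hi - lo ≤ d → lo ≤ insPos xs w → insPos xs w ≤ hi →
      hi ≤ xs.length → bsearch xs w d lo hi = insPos xs w := by
  intro d
  induction d with
  | zero =>
    intro lo hi h0 h1 h2 h3
    rw [bsearch]
    omega
  | succ d ih =>
    intro lo hi h0 h1 h2 h3
    by_cases hlh : lo < hi
    · rw [bsearch, if_pos hlh]
      dsimp only
      by_cases hm : (xs.getD ((lo + hi) / 2) (0, 'E')).1 ≤ w
      · rw [if_pos hm]
        have hmid : (lo + hi) / 2 < insPos xs w := by
          by_contra hcon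
          exact sorted_insPos_gt xs w hs _ (by omega) (by omega) hm
        exact ih ((lo + hi) / 2 + 1) hi (by omega) (by omega) h2 h3
      · rw [if_neg hm]
        have hmid : insPos xs w ≤ (lo + hi) / 2 := by
          by_contra hcon
          exact hm (insPos_le_mem xs w _ (by omega))
        exact ih lo ((lo + hi) / 2) (by omega) h1 hmid (by omega)
    · rw [bsearch, if_neg hlh]
      omega

-- PySem.List.insert at an in-range Nat position is exactly take/insert/drop.
theorem pyInsert_take_drop (xs : List (Int × Char)) (v : Int × Char) (i : Nat)
    (h : i ≤ xs.length) :
    PySem.List.insert xs (i : Int) v = xs.take i ++ [v] ++ xs.drop i := by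
  unfold PySem.List.insert PySem.List.sliceIndices
  have h1 : ¬ ((i : Int) < 0) := by omega
  have h2 : ((i : Int) ⊓ xs.length).toNat = i := by omega
  simp [h1, h2]

theorem insW_all_le (xs : List (Int × Char)) (w : Int) (h : ∀ p ∈ xs, p.1 ≤ w) :
    insW xs w = xs ++ [(w, 'I')] := by
  induction xs with
  | nil => simp [insW]
  | cons p xs ih =>
    rw [insW, if_pos (h p (List.mem_cons_self))]
    simp [ih (fun q hq => h q (List.mem_cons_of_mem _ hq))]

theorem mergeEI_push (L Q : List Int) (w : Int) (h : ∀ q ∈ Q, q ≤ w) :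
    mergeEI L (Q ++ [w]) = insW (mergeEI L Q) w := by
  induction L, Q using mergeEI.induct with
  | case1 Q =>
    simp only [mergeEI, List.map_append, List.map]
    rw [insW_all_le]
    intro p hp
    simp at hp
    rcases hp with ⟨q, hq, rfl⟩
    exact h q hq
  | case2 a L ih =>
    simp only [List.nil_append] at *
    by_cases haw : a ≤ w
    · rw [show mergeEI (a :: L) [w] = (a, 'E') :: mergeEI L [w] by simp [mergeEI, haw],
          ih (by simp),
          show mergeEI (a :: L) [] = (a, 'E') :: mergeEI L [] by simp [mergeEI],
          show insW ((a, 'E') :: mergeEI L []) w = (a, 'E') :: insW (mergeEI L []) w by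
            simp [insW, haw]]
    · rw [show mergeEI (a :: L) [w] = (w, 'I') :: mergeEI (a :: L) [] by simp [mergeEI, haw],
          show mergeEI (a :: L) [] = (a, 'E') :: mergeEI L [] by simp [mergeEI],
          show insW ((a, 'E') :: mergeEI L []) w = (w, 'I') :: (a, 'E') :: mergeEI L [] by
            simp [insW, haw]]
  | case3 a L b Q hab ih =>
    have hbw : b ≤ w := h b (by simp)
    have habw : a ≤ w := le_trans hab hbw
    rw [show mergeEI (a :: L) ((b :: Q) ++ [w]) = (a, 'E') :: mergeEI L ((b :: Q) ++ [w]) by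
          simp [mergeEI, hab],
        ih h,
        show mergeEI (a :: L) (b :: Q) = (a, 'E') :: mergeEI L (b :: Q) by simp [mergeEI, hab],
        show insW ((a, 'E') :: mergeEI L (b :: Q)) w = (a, 'E') :: insW (mergeEI L (b :: Q)) w by
          simp [insW, habw]]
  | case4 a L b Q hab ih =>
    have hbw : b ≤ w := h b (by simp)
    rw [show mergeEI (a :: L) ((b :: Q) ++ [w]) = (b, 'I') :: mergeEI (a :: L) (Q ++ [w]) by
          simp [mergeEI, hab],
        ih (fun q hq => h q (List.mem_cons_of_mem b hq)),
        show mergeEI (a :: L) (b :: Q) = (b, 'I') :: mergeEI (a :: L) Q by simp [mergeEI, hab],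
        show insW ((b, 'I') :: mergeEI (a :: L) Q) w = (b, 'I') :: insW (mergeEI (a :: L) Q) w by
          simp [insW, hbw]]

theorem pairwise_tail {α : Type} {R : α → α → Prop} {l : List α}
    (h : l.Pairwise R) : l.tail.Pairwise R := by
  cases l with
  | nil => simp
  | cons a l => exact (List.pairwise_cons.mp h).2

theorem mem_tail {α : Type} {l : List α} {x : α} (h : x ∈ l.tail) : x ∈ l := by
  cases l with
  | nil => simp at h
  | cons a l => exact List.mem_cons_of_mem _ h

-- One selection of A's rule, seen on the merged worklist.
theorem pick_decomp (L : List Int) (i : Nat) (Q : List Int)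
    (hi : i ≤ L.length) (hne : i < L.length ∨ Q ≠ []) :
    ∃ v i' Q' c, pickA L i Q = (v, i', Q', c) ∧
      mergeEI (L.drop i) Q = (v, c) :: mergeEI (L.drop i') Q' ∧
      i' ≤ L.length ∧
      ((Q' = Q ∧ i' = i + 1 ∧ i < L.length) ∨
       (Q ≠ [] ∧ v = Q.headD 0 ∧ Q' = Q.tail ∧ i' = i)) := by
  by_cases hp : Q = [] ∨ (i < L.length ∧ L.getD i 0 ≤ Q.headD 0)
  · have hil : i < L.length := by
      rcases hp with hq | hq
      · rcases hne with h | h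
        · exact h
        · exact absurd hq h
      · exact hq.1
    have hdrop : L.drop i = L.getD i 0 :: L.drop (i + 1) := by
      rw [List.getD_eq_getElem L 0 hil, List.drop_eq_getElem_cons hil]
    refine ⟨L.getD i 0, i + 1, Q, 'E', by rw [pickA, if_pos hp], ?_, by omega, Or.inl ⟨rfl, rfl, hil⟩⟩
    cases Q with
    | nil => rw [hdrop]; simp only [mergeEI]
    | cons b Q' =>
      have hab : L.getD i 0 ≤ b := by
        rcases hp with hq | hq
        · simp at hq
        · simpa using hq.2
      rw [hdrop]
      simp only [mergeEI, if_pos hab]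
  · push Not at hp
    obtain ⟨hQne, hcond⟩ := hp
    cases Q with
    | nil => exact absurd rfl hQne
    | cons b Q' =>
      refine ⟨b, i, Q', 'I', ?_, ?_, hi, Or.inr ⟨hQne, rfl, rfl, rfl⟩⟩
      · rw [pickA, if_neg]
        · rfl
        · push Not
          exact ⟨hQne, by simpa using hcond⟩
      · cases hdrop : L.drop i with
        | nil => simp only [mergeEI, List.map]
        | cons a rest =>
          have hil : i < L.length := by
            by_contra hge
            rw [List.drop_eq_nil_of_le (by omega)] at hdrop
            simp at hdrop
          have ha : a = L.getD i 0 := by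
            have h2 : a :: rest = L[i] :: L.drop (i + 1) := by
              rw [← hdrop, List.drop_eq_getElem_cons hil]
            injection h2 with h3 _
            rw [h3, List.getD_eq_getElem L 0 hil]
          have hnab : ¬ a ≤ b := by
            rw [ha]
            simpa using hcond hil
          simp only [mergeEI, if_neg hnab]

-- Step 2: sigAcc equals loopB on the merged sorted worklist (the invariant proof).
theorem sigAcc_eq_loopB (fuel : Nat) (L : List Int) (hL : L.Pairwise (· ≤ ·)) :
    ∀ (i : Nat) (Q : List Int) (sig : List Char), i ≤ L.length →
    Q.Pairwise (· ≤ ·) →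
    (Q = [] → L.length - i ≠ 1) →
    (∀ x y rest, mergeEI (L.drop i) Q = x :: y :: rest →
      ∀ q ∈ Q, (q, 'I') ∈ rest → q ≤ x.1 + y.1) →
    sigAcc fuel L i Q sig = loopB fuel (mergeEI (L.drop i) Q) sig ++ ['I'] := by
  induction fuel with
  | zero => intro i Q sig _ _ _ _; simp [sigAcc, loopB]
  | succ fuel ih =>
    intro i Q sig hi hQ hQnil hbnd
    have hlenG : (mergeEI (L.drop i) Q).length = (L.length - i) + Q.length := by
      rw [mergeEI_length]; simp
    by_cases hc : i < L.length ∨ Q.length > 1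
    · -- the loop runs once more
      have hG2 : (mergeEI (L.drop i) Q).length > 1 := by
        rw [hlenG]
        rcases hc with h | h
        · by_cases hq0 : Q = []
          · have := hQnil hq0; subst hq0; simp; omega
          · have : 0 < Q.length := List.length_pos_of_ne_nil hq0
            omega
        · omega
      have hne1 : i < L.length ∨ Q ≠ [] := by
        rcases hc with h | h
        · exact Or.inl h
        · right; intro h0; subst h0; simp at h
      obtain ⟨x, i₁, Q₁, c₁, hp1, hm1, hi1, hcase1⟩ := pick_decomp L i Q hi hne1
      have hne2 : i₁ < L.length ∨ Q₁ ≠ [] := by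
        by_contra hcon
        push Not at hcon
        have hz : (mergeEI (L.drop i₁) Q₁).length = 0 := by
          rw [mergeEI_length, List.drop_eq_nil_of_le (by omega), hcon.2]
          simp
        have : (mergeEI (L.drop i) Q).length = 1 := by rw [hm1]; simp [hz]
        omega
      obtain ⟨y, i₂, Q₂, c₂, hp2, hm2, hi2, hcase2⟩ := pick_decomp L i₁ Q₁ hi1 hne2
      have hG : mergeEI (L.drop i) Q = (x, c₁) :: (y, c₂) :: mergeEI (L.drop i₂) Q₂ := by
        rw [hm1, hm2]
      -- queue containment and order
      have hQ₁sub : ∀ q ∈ Q₁, q ∈ Q := by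
        rcases hcase1 with ⟨h, _⟩ | ⟨_, _, h, _⟩ <;> rw [h]
        · exact fun q hq => hq
        · exact fun q hq => mem_tail hq
      have hQ₂sub : ∀ q ∈ Q₂, q ∈ Q := by
        rcases hcase2 with ⟨h, _⟩ | ⟨_, _, h, _⟩ <;> rw [h]
        · exact hQ₁sub
        · exact fun q hq => hQ₁sub q (mem_tail hq)
      have hQ₁pw : Q₁.Pairwise (· ≤ ·) := by
        rcases hcase1 with ⟨h, _⟩ | ⟨_, _, h, _⟩ <;> rw [h]
        · exact hQ
        · exact pairwise_tail hQ
      have hQ₂pw : Q₂.Pairwise (· ≤ ·) := by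
        rcases hcase2 with ⟨h, _⟩ | ⟨_, _, h, _⟩ <;> rw [h]
        · exact hQ₁pw
        · exact pairwise_tail hQ₁pw
      have hqw : ∀ q ∈ Q₂, q ≤ x + y := fun q hq =>
        hbnd (x, c₁) (y, c₂) _ hG q (hQ₂sub q hq) (mem_mergeEI_int _ _ q hq)
      -- sortedness of the worklist
      have hGs : (mergeEI (L.drop i) Q).Pairwise (fun p r => p.1 ≤ r.1) :=
        mergeEI_sorted _ _ (List.Pairwise.sublist (List.drop_sublist _ _) hL) hQ
      rw [hG] at hGs
      have hxy : x ≤ y := (List.pairwise_cons.mp hGs).1 (y, c₂) (by simp)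
      have hG₂ge : ∀ p ∈ mergeEI (L.drop i₂) Q₂, y ≤ p.1 := fun p hp =>
        (List.pairwise_cons.mp (List.pairwise_cons.mp hGs).2).1 p hp
      have hpush : mergeEI (L.drop i₂) (Q₂ ++ [x + y]) =
          insW (mergeEI (L.drop i₂) Q₂) (x + y) := mergeEI_push _ _ _ hqw
      -- the invariant for the next state
      have hbnd' : ∀ x' y' rest', mergeEI (L.drop i₂) (Q₂ ++ [x + y]) = x' :: y' :: rest' →
          ∀ q ∈ Q₂ ++ [x + y], (q, 'I') ∈ rest' → q ≤ x'.1 + y'.1 := by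
        intro x' y' rest' hG' q hqmem hqrest
        rw [hpush] at hG'
        have hqw' : q ≤ x + y := by
          rcases List.mem_append.mp hqmem with h | h
          · exact hqw q h
          · simp at h; omega
        have hx'mem : x' ∈ insW (mergeEI (L.drop i₂) Q₂) (x + y) := by
          rw [hG']; exact List.mem_cons_self
        have hy'mem : y' ∈ insW (mergeEI (L.drop i₂) Q₂) (x + y) := by
          rw [hG']; simp
        by_cases hQ₂e : Q₂ = []
        · -- only the freshly pushed weight is in the queue: a counting argument
          have hq' : q = x + y := by
            rcases List.mem_append.mp hqmem with h | h
            · rw [hQ₂e] at h; simp at h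
            · simpa using h
          have hlab : ((x + y), 'I') ∉ mergeEI (L.drop i₂) Q₂ := by
            intro hmem
            have := labels_mergeEI_nil (L.drop i₂) _ (hQ₂e ▸ hmem)
            simp at this
          have hcount : (insW (mergeEI (L.drop i₂) Q₂) (x + y)).count ((x + y), 'I') = 1 := by
            rw [List.Perm.count_eq (insW_perm _ _)]
            simp [List.count_eq_zero.mpr hlab]
          have h2 : ((x' :: y' :: rest').count ((x + y), 'I')) = 1 := by
            rw [← hG']; exact hcount
          have hge1 : 0 < rest'.count ((x + y), 'I') :=
            List.count_pos_iff.mpr (hq' ▸ hqrest)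
          have hxv : x' ≠ ((x + y), 'I') := by
            intro he
            rw [he] at h2
            simp [List.count_cons] at h2
            omega
          have hyv : y' ≠ ((x + y), 'I') := by
            intro he
            rw [he] at h2
            simp [List.count_cons] at h2
            omega
          have hx'G : x' ∈ mergeEI (L.drop i₂) Q₂ := by
            rcases mem_insW _ _ _ hx'mem with h | h
            · exact absurd h hxv
            · exact h
          have hy'G : y' ∈ mergeEI (L.drop i₂) Q₂ := by
            rcases mem_insW _ _ _ hy'mem with h | h
            · exact absurd h hyv
            · exact h
          have h3 := hG₂ge _ hx'G
          have h4 := hG₂ge _ hy'G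
          rw [hq']
          linarith
        · -- the queue tail is nonempty: all weights present are nonnegative
          obtain ⟨q₀, hq₀⟩ := List.exists_mem_of_ne_nil Q₂ hQ₂e
          have h1 : y ≤ q₀ := hG₂ge _ (mem_mergeEI_int _ _ _ hq₀)
          have h2 : q₀ ≤ x + y := hqw _ hq₀
          have hx0 : (0 : Int) ≤ x := by linarith
          have hy0 : (0 : Int) ≤ y := by linarith
          have hx'c : x'.1 = x + y ∨ y ≤ x'.1 := by
            rcases mem_insW _ _ _ hx'mem with h | h
            · rw [h]; exact Or.inl rfl
            · exact Or.inr (hG₂ge _ h)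
          have hy'c : y'.1 = x + y ∨ y ≤ y'.1 := by
            rcases mem_insW _ _ _ hy'mem with h | h
            · rw [h]; exact Or.inl rfl
            · exact Or.inr (hG₂ge _ h)
          rcases hx'c with h3 | h3 <;> rcases hy'c with h4 | h4 <;> linarith
      have hpw' : (Q₂ ++ [x + y]).Pairwise (· ≤ ·) := by
        apply List.pairwise_append.mpr
        exact ⟨hQ₂pw, by simp, by simpa using hqw⟩
      -- unfold one iteration of both loops
      rw [sigAcc, if_pos hc, hp1]
      dsimp only
      rw [hp2]
      dsimp only
      conv_rhs => rw [loopB]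
      rw [if_pos hG2, hG]
      simp only [List.getD_cons_zero, List.getD_cons_succ, List.drop_succ_cons,
        List.drop_zero]
      have hG₂pw : (mergeEI (L.drop i₂) Q₂).Pairwise (fun p r => p.1 ≤ r.1) :=
        (List.pairwise_cons.mp (List.pairwise_cons.mp hGs).2).2
      rw [bsearch_eq _ _ hG₂pw (mergeEI (L.drop i₂) Q₂).length 0 _ (by omega)
            (by omega) (insPos_le_length _ _) (le_refl _),
          pyInsert_take_drop _ _ _ (insPos_le_length _ _),
          ← insW_eq_insPos, ← hpush]
      exact ih i₂ (Q₂ ++ [x + y]) (sig ++ [c₁, c₂]) hi2 hpw' (by simp) hbnd'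
    · -- the loop exits: both sides append the final 'I'
      have hle : ¬ (mergeEI (L.drop i) Q).length > 1 := by
        rw [hlenG]
        push Not at hc ⊢
        omega
      rw [sigAcc, if_neg hc]
      conv_rhs => rw [loopB]
      rw [if_neg hle]

-- On the initial all-leaf worklist the first recorded label is 'E'.
theorem loopB_head_E (fuel : Nat) (a b : Int) (r : List (Int × Char)) :
    ∃ t, loopB (fuel + 1) ((a, 'E') :: (b, 'E') :: r) [] = 'E' :: t := by
  simp only [loopB]
  rw [if_pos (by simp)]
  simp only [List.getD_cons_zero, List.getD_cons_succ, List.drop_succ_cons, List.drop_zero]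
  rw [loopB_append]
  exact ⟨'E' :: loopB fuel (PySem.List.insert r ((bsearch r (a + b) r.length 0 r.length : Nat) : Int) (a + b, 'I')) [], by simp⟩

-- ===== VERDICT (by name: the statement is the Claim_ definition above) =====
theorem EISignatureAndAlternation_spec : Claim_equal_EISignatureAndAlternation := by
  intro W _
  unfold Spec_EISignatureAndAlternation EISignatureAndAlternation EISignatureAndAlternation_alt
  by_cases h0 : W = []
  · simp [h0]
  · rw [if_neg h0, if_neg h0]
    by_cases h1 : W.length = 1
    · rw [if_pos h1, if_pos h1]
    · rw [if_neg h1, if_neg h1]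
      dsimp only
      have hW : 2 ≤ W.length := by
        rcases W with _ | ⟨a, _ | ⟨b, t⟩⟩ <;> simp_all
      have hlen : (PySem.List.sorted W (fun x => x) false).length = W.length :=
        PySem.List.length_sorted W _ _
      have hL : (PySem.List.sorted W (fun x => x) false).Pairwise (· ≤ ·) :=
        PySem.List.sorted_pairwise W (fun x => x)
      have hmain := sigAcc_eq_loopB W.length (PySem.List.sorted W (fun x => x) false) hL
        0 [] [] (by omega) (by simp) (by intro _; omega) (by intro x y rest _ q hq; simp at hq)
      rw [List.drop_zero, mergeEI_nil_right] at hmain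
      have hA := loopA_eq_sigAcc W.length (PySem.List.sorted W (fun x => x) false) 0 [] [] 'E' 0
      simp only [List.map_nil, List.nil_append] at hA
      rw [hA, hmain]
      -- the signature starts with 'E'
      obtain ⟨w0, w1, wr, hws⟩ :
          ∃ w0 w1 wr, PySem.List.sorted W (fun x => x) false = w0 :: w1 :: wr := by
        rcases hs : PySem.List.sorted W (fun x => x) false with _ | ⟨a, _ | ⟨b, t⟩⟩
        · rw [hs] at hlen; simp at hlen; omega
        · rw [hs] at hlen; simp at hlen; omega
        · exact ⟨a, b, t, rfl⟩
      obtain ⟨m, hm⟩ : ∃ m, W.length = m + 1 := ⟨W.length - 1, by omega⟩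
      obtain ⟨t, ht⟩ := loopB_head_E m w0 w1 (wr.map (fun w => (w, 'E')))
      rw [hws]
      simp only [List.map_cons]
      rw [hm, ht]
      refine Prod.ext rfl ?_
      show (0 : Int) + countTrans 'E' ('E' :: t ++ ['I']) = pairCount ('E' :: t ++ ['I'])
      rw [show ('E' :: t ++ ['I']) = 'E' :: (t ++ ['I']) by simp,
        pairCount_eq_countTrans]
      simp [countTrans]
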